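-- pv_equiv track=rewrite | github.com/terry-nederveld/agent-definition-language | scripts/generate_ietf.py | adjust_heading_levels
-- ===== SOURCE A (Python) =====
-- def adjust_heading_levels(text: str) -> str:
--     """Promote all headings one level for kramdown-rfc.
--
--     kramdown-rfc uses # for top-level sections (which become RFC section 1, 2, etc).
--     The spec uses ## for top-level and ### for subsections, so we remove one #.
--     """
--     lines = text.split("\n")
--     result = []
--     for line in lines:
--         # #### -> ### (sub-subsection)
--         if line.startswith("#### "):
--             result.append(line[1:])
--         # ### N.M -> ## N.M (subsection)
--         elif line.startswith("### "):
--             result.append(line[1:])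
--         # ## N. -> # N. (top-level section)
--         elif line.startswith("## "):
--             result.append(line[1:])
--         else:
--             result.append(line)
--     return "\n".join(result)
-- ===== SOURCE B (Python) =====
-- def adjust_heading_levels(text: str) -> str:
--     """Promote all headings one level for kramdown-rfc.
--
--     Single character-stream pass: at each line start, count the leading
--     '#' run (capped at 4); if it is 2-4 hashes followed by a space, skip
--     one '#'. No line list is built and no join is performed.
--     """
--     out = []
--     start = True
--     i = 0
--     n = len(text)
--     while i < n:
--         c = text[i]
--         if start and c == '#':
--             k = 0
--             while i + k < n and k < 4 and text[i + k] == '#':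
--                 k += 1
--             if k >= 2 and i + k < n and text[i + k] == ' ':
--                 i += 1          # drop exactly one '#'
--                 c = text[i]
--         out.append(c)
--         start = c == '\n'
--         i += 1
--     return ''.join(out)
-- ===== Notes on version B (the rewrite author's own statement) =====
-- stated objective: alternative
-- what changed: Replaces A's split-into-lines / three-branch prefix test / rejoin with a single character-stream pass that counts the leading hash run at each line start (capped at 4) and skips one hash when 2-4 hashes are followed by a space.
import Mathlib
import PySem

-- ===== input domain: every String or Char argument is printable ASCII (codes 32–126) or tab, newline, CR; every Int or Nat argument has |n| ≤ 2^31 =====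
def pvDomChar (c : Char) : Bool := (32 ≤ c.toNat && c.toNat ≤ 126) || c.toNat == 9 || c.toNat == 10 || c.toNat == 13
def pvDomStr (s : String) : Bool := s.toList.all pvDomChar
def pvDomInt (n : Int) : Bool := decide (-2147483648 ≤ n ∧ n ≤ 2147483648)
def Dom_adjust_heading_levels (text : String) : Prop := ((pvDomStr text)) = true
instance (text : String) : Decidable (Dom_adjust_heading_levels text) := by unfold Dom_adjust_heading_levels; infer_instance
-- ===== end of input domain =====

-- B replaces A's split/branch/join over a line list by one character-stream pass (alternative decomposition, same cost).

-- ===== PORT A =====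
def pvFixLine (line : String) : String :=
  if PySem.Str.startswith line "#### " then PySem.Str.slice line (some 1) none
  else if PySem.Str.startswith line "### " then PySem.Str.slice line (some 1) none
  else if PySem.Str.startswith line "## " then PySem.Str.slice line (some 1) none
  else line

def adjust_heading_levels (text : String) : String :=
  let lines := (PySem.Str.split? text "\n").getD []   -- getD never hit: sep "\n" ≠ ""
  let result := lines.foldl (fun res line => res ++ [pvFixLine line]) []
  PySem.Str.join "\n" result

-- ===== PORT B =====
-- leading-'#' run length, capped (B's inner while loop: k < 4)
def pvHashCnt : List Char → Nat → Nat
  | c :: r, n + 1 => if c = '#' then pvHashCnt r n + 1 else 0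
  | _, _ => 0

-- B's promotion test at a line start: 2–4 hashes then a space
def pvPromo (l : List Char) : Bool :=
  let k := pvHashCnt l 4
  decide (2 ≤ k) && decide (l[k]? = some ' ')

def pvBGo : Bool → List Char → List Char
  | _, [] => []
  | start, c :: rest =>
    if start && (c == '#') && pvPromo (c :: rest) then
      pvBGo false rest                 -- drop exactly one '#'
    else
      c :: pvBGo (c == '\n') rest

def adjust_heading_levels_alt (text : String) : String :=
  String.ofList (pvBGo true text.toList)

-- ===== PRECONDITION & SPEC =====
def Spec_adjust_heading_levels (text : String) (out : String) : Prop := out = adjust_heading_levels_alt text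
instance (text : String) (out : String) : Decidable (Spec_adjust_heading_levels text out) := by unfold Spec_adjust_heading_levels; infer_instance

-- ===== CLAIM (what is proved, stated in full; the proofs are below) =====
def Claim_equal_adjust_heading_levels : Prop := ∀ (text : String), Dom_adjust_heading_levels text → Spec_adjust_heading_levels text (adjust_heading_levels text)

-- ===== LEMMAS AND PROOFS =====

-- char-level picture of A's per-line fix
def fLineC (l : List Char) : List Char :=
  if ['#','#','#','#',' '] <+: l then l.tail
  else if ['#','#','#',' '] <+: l then l.tail
  else if ['#','#',' '] <+: l then l.tail
  else l

-- reference splitter for split("\n")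
def mySplit : List Char → List (List Char)
  | [] => [[]]
  | c :: r => if c = '\n' then [] :: mySplit r else (mySplit r).modifyHead (c :: ·)

theorem mySplit_ne_nil (cs : List Char) : mySplit cs ≠ [] := by
  induction cs with
  | nil => simp [mySplit]
  | cons c r ih =>
    simp only [mySplit]
    split
    · simp
    · cases h : mySplit r with
      | nil => exact absurd h ih
      | cons a b => simp

theorem splitOn_go_eq (fuel : Nat) (l cur : List Char) (acc : List (List Char))
    (h : l.length ≤ fuel) :
    PySem.Chars.splitOn.go ['\n'] fuel l cur acc
      = acc.reverse ++ (mySplit l).modifyHead (cur.reverse ++ ·) := by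
  induction fuel generalizing l cur acc with
  | zero =>
    have hl : l = [] := List.eq_nil_of_length_eq_zero (Nat.le_zero.mp h)
    subst hl
    rw [PySem.Chars.splitOn.go.eq_def]
    simp [mySplit]
  | succ fuel ih =>
    cases l with
    | nil => rw [PySem.Chars.splitOn.go.eq_def]; simp [mySplit]
    | cons c rest =>
      rw [PySem.Chars.splitOn.go.eq_def]
      by_cases hc : c = '\n'
      · subst hc
        have hpre : (['\n'] : List Char).isPrefixOf ('\n' :: rest) = true := by
          simp [List.isPrefixOf]
        simp only [hpre, if_true]
        rw [show List.drop (['\n'] : List Char).length ('\n' :: rest) = rest from rfl]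
        rw [ih rest [] _ (by simpa using Nat.le_of_succ_le_succ (by simpa using h))]
        simp only [mySplit, List.reverse_cons, List.reverse_nil, List.nil_append]
        cases hms : mySplit rest with
        | nil => exact absurd hms (mySplit_ne_nil rest)
        | cons a b => simp
      · have hpre : (['\n'] : List Char).isPrefixOf (c :: rest) = false := by
          simp only [List.isPrefixOf, Bool.and_eq_false_iff, beq_eq_false_iff_ne, ne_eq]
          left
          exact fun hh => hc hh.symm
        simp only [hpre, Bool.false_eq_true, if_false]
        rw [ih rest (c :: cur) acc (by simpa using Nat.le_of_succ_le_succ (by simpa using h))]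
        simp only [mySplit, hc, if_false]
        cases hms : mySplit rest with
        | nil => exact absurd hms (mySplit_ne_nil rest)
        | cons a b => simp

theorem splitOn_eq (cs : List Char) : PySem.Chars.splitOn cs ['\n'] = mySplit cs := by
  unfold PySem.Chars.splitOn
  rw [splitOn_go_eq cs.length.succ cs [] [] (Nat.le_succ _)]
  cases hms : mySplit cs with
  | nil => exact absurd hms (mySplit_ne_nil cs)
  | cons a b => simp

theorem foldl_append_eq_map (f : String → String) (l : List String) (acc : List String) :
    l.foldl (fun r x => r ++ [f x]) acc = acc ++ l.map f := by
  induction l generalizing acc with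
  | nil => simp
  | cons x xs ih => simp [List.foldl_cons, ih]

theorem fix_toList (s : String) : (pvFixLine s).toList = fLineC s.toList := by
  have h4 : (PySem.Str.startswith s "#### " = true) = (['#','#','#','#',' '] <+: s.toList) := by
    rw [PySem.Str.startswith_eq, PySem.Chars.startswith_iff,
      show ("#### ".toList : List Char) = ['#','#','#','#',' '] from rfl]
  have h3 : (PySem.Str.startswith s "### " = true) = (['#','#','#',' '] <+: s.toList) := by
    rw [PySem.Str.startswith_eq, PySem.Chars.startswith_iff,
      show ("### ".toList : List Char) = ['#','#','#',' '] from rfl]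
  have h2 : (PySem.Str.startswith s "## " = true) = (['#','#',' '] <+: s.toList) := by
    rw [PySem.Str.startswith_eq, PySem.Chars.startswith_iff,
      show ("## ".toList : List Char) = ['#','#',' '] from rfl]
  simp only [pvFixLine, fLineC, h4, h3, h2]
  split_ifs <;>
    simp [PySem.Str.toList_slice, PySem.Chars.slice_eq_listSlice, PySem.List.slice_from_one]

theorem hashCnt_le (l : List Char) (n : Nat) : pvHashCnt l n ≤ n := by
  induction l generalizing n with
  | nil => cases n <;> simp [pvHashCnt]
  | cons c r ih =>
    cases n with
    | zero => simp [pvHashCnt]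
    | succ m =>
      simp only [pvHashCnt]
      split
      · have := ih m; omega
      · omega

theorem hashCnt_prefix (l : List Char) (n : Nat) :
    List.replicate (pvHashCnt l n) '#' <+: l := by
  induction l generalizing n with
  | nil => cases n <;> simp [pvHashCnt]
  | cons c r ih =>
    cases n with
    | zero => simp [pvHashCnt]
    | succ m =>
      simp only [pvHashCnt]
      split
      · next hc =>
        subst hc
        rw [List.replicate_succ]
        exact List.cons_prefix_cons.mpr ⟨rfl, ih m⟩
      · simp

theorem prefix_snoc_of_getElem (p l : List Char) (a : Char)
    (h : p <+: l) (hg : l[p.length]? = some a) : p ++ [a] <+: l := by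
  obtain ⟨t, rfl⟩ := h
  cases t with
  | nil => simp at hg
  | cons b t' =>
    simp only [List.getElem?_append_right (Nat.le_refl p.length), Nat.sub_self] at hg
    simp only [List.getElem?_cons_zero, Option.some.injEq] at hg
    subst hg
    exact ⟨t', by simp⟩

theorem cond_iff (c : Char) (rest : List Char) :
    (((c == '#') && pvPromo (c :: rest)) = true) ↔
      (['#','#','#','#',' '] <+: c :: rest ∨ ['#','#','#',' '] <+: c :: rest ∨
        ['#','#',' '] <+: c :: rest) := by
  constructor
  · rintro h
    simp only [Bool.and_eq_true, beq_iff_eq, pvPromo, decide_eq_true_eq] at h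
    obtain ⟨hc, h2, hsp⟩ := h
    have hle := hashCnt_le (c :: rest) 4
    have hpre := hashCnt_prefix (c :: rest) 4
    set k := pvHashCnt (c :: rest) 4 with hk
    have hfull : List.replicate k '#' ++ [' '] <+: c :: rest :=
      prefix_snoc_of_getElem _ _ _ hpre (by simpa using hsp)
    interval_cases k
    · right; right; simpa using hfull
    · right; left; simpa using hfull
    · left; simpa using hfull
  · rintro (⟨t, ht⟩ | ⟨t, ht⟩ | ⟨t, ht⟩) <;>
      · cases ht
        simp [pvPromo, pvHashCnt]

theorem prefix_takeWhile_iff (p cs : List Char) (hp : ∀ c ∈ p, c ≠ '\n') :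
    p <+: cs.takeWhile (· ≠ '\n') ↔ p <+: cs := by
  induction p generalizing cs with
  | nil => simp
  | cons a q ih =>
    cases cs with
    | nil => simp [List.takeWhile]
    | cons c r =>
      by_cases hc : c = '\n'
      · subst hc
        simp only [List.takeWhile_cons]
        have : ¬ (('\n' : Char) ≠ '\n') := by simp
        simp only [this, decide_false]
        constructor
        · intro h; simp at h
        · intro h
          obtain ⟨hh, -⟩ := List.cons_prefix_cons.mp h
          exact absurd hh (hp a (by simp))
      · simp only [List.takeWhile_cons, hc, ne_eq, not_false_iff, decide_true, if_true]
        constructor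
        · intro h
          obtain ⟨hh, ht⟩ := (List.cons_prefix_cons).mp h
          exact List.cons_prefix_cons.mpr ⟨hh, (ih r (fun x hx => hp x (by simp [hx]))).mp ht⟩
        · intro h
          obtain ⟨hh, ht⟩ := (List.cons_prefix_cons).mp h
          exact List.cons_prefix_cons.mpr ⟨hh, (ih r (fun x hx => hp x (by simp [hx]))).mpr ht⟩

def tailPart (cs : List Char) : List Char :=
  match cs.dropWhile (· ≠ '\n') with
  | [] => []
  | _ :: r => '\n' :: pvBGo true r

theorem bGo_false (cs : List Char) :
    pvBGo false cs = cs.takeWhile (· ≠ '\n') ++ tailPart cs := by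
  induction cs with
  | nil => simp [pvBGo, tailPart]
  | cons c rest ih =>
    by_cases hc : c = '\n'
    · subst hc
      simp [pvBGo, tailPart]
    · simp only [pvBGo, Bool.false_and, Bool.false_eq_true, if_false]
      have : (c == '\n') = false := by simp [hc]
      rw [this, ih]
      simp only [tailPart, List.takeWhile_cons, List.dropWhile_cons]
      simp [hc]

theorem bGo_true (cs : List Char) :
    pvBGo true cs = fLineC (cs.takeWhile (· ≠ '\n')) ++ tailPart cs := by
  cases cs with
  | nil => simp [pvBGo, fLineC, tailPart]
  | cons c rest =>
    by_cases hcond : ((c == '#') && pvPromo (c :: rest)) = true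
    · have hpfx := (cond_iff c rest).mp hcond
      have hc : c = '#' := by
        simp only [Bool.and_eq_true, beq_iff_eq] at hcond; exact hcond.1
      have hcn : c ≠ '\n' := by rw [hc]; decide
      have hgo : pvBGo true (c :: rest) = pvBGo false rest := by
        simp only [pvBGo, Bool.true_and, hcond, if_true]
      rw [hgo, bGo_false]
      have htw : (c :: rest).takeWhile (· ≠ '\n') = c :: rest.takeWhile (· ≠ '\n') := by
        simp [hcn]
      have htp : tailPart (c :: rest) = tailPart rest := by
        simp only [tailPart, List.dropWhile_cons]
        simp [hcn]
      rw [htw, htp]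
      have hno : ∀ p ∈ [(['#','#','#','#',' '] : List Char), ['#','#','#',' '], ['#','#',' ']],
          (p <+: (c :: rest).takeWhile (· ≠ '\n') ↔ p <+: c :: rest) := by
        intro p hp
        exact prefix_takeWhile_iff p (c :: rest) (by fin_cases hp <;> simp)
      -- fLineC on the takeWhile line: one of the prefixes holds there, so it is tail
      have : fLineC (c :: rest.takeWhile (· ≠ '\n')) = rest.takeWhile (· ≠ '\n') := by
        rw [← htw]
        simp only [fLineC]
        rcases hpfx with h | h | h
        · rw [if_pos ((hno _ (by simp)).mpr h)]
          rw [htw]; rfl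
        · by_cases h4 : ['#','#','#','#',' '] <+: (c :: rest).takeWhile (· ≠ '\n')
          · rw [if_pos h4, htw]; rfl
          · rw [if_neg h4, if_pos ((hno _ (by simp)).mpr h), htw]; rfl
        · by_cases h4 : ['#','#','#','#',' '] <+: (c :: rest).takeWhile (· ≠ '\n')
          · rw [if_pos h4, htw]; rfl
          · by_cases h3 : ['#','#','#',' '] <+: (c :: rest).takeWhile (· ≠ '\n')
            · rw [if_neg h4, if_pos h3, htw]; rfl
            · rw [if_neg h4, if_neg h3, if_pos ((hno _ (by simp)).mpr h), htw]; rfl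
      rw [this]
    · have hgo : pvBGo true (c :: rest) = c :: pvBGo (c == '\n') rest := by
        simp only [pvBGo, Bool.true_and]
        rw [if_neg hcond]
      by_cases hc : c = '\n'
      · subst hc
        rw [hgo]
        simp [fLineC, tailPart]
      · have hb : (c == '\n') = false := by simp [hc]
        rw [hgo, hb, bGo_false]
        have htw : (c :: rest).takeWhile (· ≠ '\n') = c :: rest.takeWhile (· ≠ '\n') := by
          simp [hc]
        have htp : tailPart (c :: rest) = tailPart rest := by
          simp only [tailPart, List.dropWhile_cons]
          simp [hc]
        rw [htw, htp]
        have hid : fLineC (c :: rest.takeWhile (· ≠ '\n')) = c :: rest.takeWhile (· ≠ '\n') := by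
          simp only [fLineC]
          rw [if_neg, if_neg, if_neg]
          all_goals
            intro h
            rw [← htw] at h
            have hcs := (prefix_takeWhile_iff _ (c :: rest) (by simp)).mp h
            exact hcond ((cond_iff c rest).mpr (by tauto))
        rw [hid]
        rfl

theorem mySplit_decomp (cs : List Char) :
    mySplit cs = match cs.dropWhile (· ≠ '\n') with
      | [] => [cs]
      | _ :: r => cs.takeWhile (· ≠ '\n') :: mySplit r := by
  induction cs with
  | nil => simp [mySplit]
  | cons c r ih =>
    by_cases hc : c = '\n'
    · subst hc; simp [mySplit, List.dropWhile]
    · simp only [mySplit, hc, if_false, List.dropWhile_cons, List.takeWhile_cons]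
      simp only [ne_eq, hc, not_false_iff, decide_true, if_true]
      rw [ih]
      cases h : r.dropWhile (· ≠ '\n') with
      | nil => simp
      | cons a b => simp

theorem main_chars (cs : List Char) :
    pvBGo true cs = PySem.Chars.join ['\n'] ((mySplit cs).map fLineC) := by
  induction hn : cs.length using Nat.strong_induction_on generalizing cs with
  | _ n ih =>
    subst hn
    rw [bGo_true, mySplit_decomp]
    cases h : cs.dropWhile (· ≠ '\n') with
    | nil =>
      have htw : cs.takeWhile (· ≠ '\n') = cs := by
        have := List.takeWhile_append_dropWhile (p := (· ≠ '\n')) (l := cs)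
        rw [h] at this; simpa using this
      simp only [tailPart, ne_eq, decide_not] at h htw ⊢
      rw [h, htw]
      simp [PySem.Chars.join, List.intercalate]
    | cons d r =>
      have hlen : r.length < cs.length := by
        have hsuf : (d :: r) <:+ cs := h ▸ List.dropWhile_suffix _
        have := hsuf.length_le
        simp at this; omega
      simp only [tailPart, h]
      rw [ih r.length hlen r rfl]
      cases hms : mySplit r with
      | nil => exact absurd hms (mySplit_ne_nil r)
      | cons a b =>
        simp only [List.map_cons, PySem.Chars.join_cons_cons]
        simp

-- ===== VERDICT (by name: the statement is the Claim_ definition above) =====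
theorem adjust_heading_levels_spec : Claim_equal_adjust_heading_levels := by
  intro text _
  unfold Spec_adjust_heading_levels adjust_heading_levels adjust_heading_levels_alt
  have hsep : ("\n" : String).toList = ['\n'] := rfl
  have hsplit : PySem.Chars.split? text.toList ['\n'] = some (mySplit text.toList) := by
    rw [PySem.Chars.split?]
    simp [splitOn_eq]
  obtain ⟨L, hL⟩ : ∃ L, PySem.Str.split? text "\n" = some L := by
    have hmap := PySem.Str.split?_map text "\n"
    rw [hsep, hsplit] at hmap
    cases hE : PySem.Str.split? text "\n" with
    | none => rw [hE] at hmap; simp at hmap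
    | some L => exact ⟨L, rfl⟩
  have hLlist : L.map String.toList = mySplit text.toList := by
    have hmap := PySem.Str.split?_map text "\n"
    rw [hsep, hsplit, hL] at hmap
    simpa using hmap
  rw [hL]
  simp only [Option.getD_some]
  rw [foldl_append_eq_map, List.nil_append]
  apply String.toList_inj.mp
  rw [PySem.Str.toList_join, hsep, List.map_map]
  rw [show (String.toList ∘ pvFixLine) = fLineC ∘ String.toList from funext fun x => fix_toList x]
  rw [← List.map_map, hLlist, ← main_chars]
  simp
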